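-- pv_equiv track=rewrite | github.com/Zena0128/Algorithm | 프로그래머스/2/42586. 기능개발/기능개발.py | solution
-- ===== SOURCE A (Python) =====
-- import math
-- from collections import deque
--
-- def solution(progresses, speeds):
--     times = []
--     for progress, speed in zip(progresses, speeds):
--         times.append(math.ceil((100-progress)/speed))
--     answer = []
--     queue = deque([])
--     for t in times:
--         if not queue:
--             queue.append(t)
--         else:
--             if queue[0] >= t:
--                 queue.append(t)
--             else:
--                 tmp = 0
--                 while queue:
--                     queue.popleft()
--                     tmp += 1
--                 answer.append(tmp)
--                 queue.append(t)
--     if queue: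
--         answer.append(len(queue))
--     return answer
-- ===== SOURCE B (Python) =====
-- import math
--
-- def solution(progresses, speeds):
--     times = [math.ceil((100 - p) / s) for p, s in zip(progresses, speeds)]
--     # batch starts = strict left-to-right records of the completion times
--     starts = []
--     m = None
--     for i, t in enumerate(times):
--         if m is None or t > m:
--             starts.append(i)
--             m = t
--     starts.append(len(times))
--     return [b - a for a, b in zip(starts, starts[1:])]
-- ===== Notes on version B (the rewrite author's own statement) =====
-- stated objective: simpler
-- what changed: Replaces the deque simulation (inner draining while-loop) by computing the batch start indices as the strict running-maximum record positions of the times and returning adjacent differences of those indices.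
import Mathlib
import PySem

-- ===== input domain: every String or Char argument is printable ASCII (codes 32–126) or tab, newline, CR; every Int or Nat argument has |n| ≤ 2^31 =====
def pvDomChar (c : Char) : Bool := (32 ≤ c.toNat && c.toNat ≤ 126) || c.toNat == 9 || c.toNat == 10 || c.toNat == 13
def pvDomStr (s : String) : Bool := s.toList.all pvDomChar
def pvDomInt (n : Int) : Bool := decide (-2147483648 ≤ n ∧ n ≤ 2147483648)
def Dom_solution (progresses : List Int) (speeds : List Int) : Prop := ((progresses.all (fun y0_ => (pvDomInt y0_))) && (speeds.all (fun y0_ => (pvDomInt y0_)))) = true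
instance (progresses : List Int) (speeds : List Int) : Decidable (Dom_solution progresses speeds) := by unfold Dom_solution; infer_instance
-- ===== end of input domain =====

-- B replaces A's deque simulation by record-index detection plus adjacent differences (objective: simpler).

-- ===== PORT A =====
-- math.ceil((100-p)/s) as exact ceiling division -((-a) // s): exact on Dom, where |values| ≤ 2^31
-- keep the float division's rounding error below any possible gap to the next integer.
def pvCeil (a b : Int) : Int := -(PySem.Int.floordiv (-a) b)

-- the inner 'while queue: queue.popleft(); tmp += 1' loop
def pvDrainCount : List Int → Int → Int
  | [], tmp => tmp
  | _ :: q, tmp => pvDrainCount q (tmp + 1)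

def solution (progresses : List Int) (speeds : List Int) : List Int :=
  let times := (List.zip progresses speeds).map (fun ps => pvCeil (100 - ps.1) ps.2)
  let st := times.foldl (fun (st : List Int × List Int) t =>
      match st.2 with
      | [] => (st.1, st.2 ++ [t])
      | q0 :: _ =>
        if q0 ≥ t then (st.1, st.2 ++ [t])
        else (st.1 ++ [pvDrainCount st.2 0], [t]))
    ([], [])
  if st.2.isEmpty then st.1 else st.1 ++ [(st.2.length : Int)]

-- ===== PORT B =====
def solution_alt (progresses : List Int) (speeds : List Int) : List Int :=
  let times := (List.zip progresses speeds).map (fun ps => pvCeil (100 - ps.1) ps.2)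
  -- 'for i, t in enumerate(times): if m is None or t > m: starts.append(i); m = t'
  let st := times.foldl (fun (st : List Int × Option Int × Int) t =>
      match st.2.1 with
      | none => (st.1 ++ [st.2.2], some t, st.2.2 + 1)
      | some m => if t > m then (st.1 ++ [st.2.2], some t, st.2.2 + 1)
                  else (st.1, some m, st.2.2 + 1))
    ([], none, 0)
  let starts := st.1 ++ [(times.length : Int)]
  (List.zip starts (starts.drop 1)).map (fun ab => ab.2 - ab.1)

-- ===== PRECONDITION & SPEC =====
-- Pre_ excludes exactly the inputs on which A raises ZeroDivisionError: a zero speed among the zipped pairs.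
def Pre_solution (progresses : List Int) (speeds : List Int) : Prop :=
  ∀ ps ∈ List.zip progresses speeds, ps.2 ≠ 0
instance (progresses : List Int) (speeds : List Int) : Decidable (Pre_solution progresses speeds) := by unfold Pre_solution; infer_instance
def pvWitness_solution : List Int × List Int := ([93, 30, 55], [1, 30, 5])

def Spec_solution (progresses : List Int) (speeds : List Int) (out : List Int) : Prop := out = solution_alt progresses speeds
instance (progresses : List Int) (speeds : List Int) (out : List Int) : Decidable (Spec_solution progresses speeds out) := by unfold Spec_solution; infer_instance

-- ===== CLAIM (what is proved, stated in full; the proofs are below) =====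
def Claim_equal_solution : Prop := ∀ (progresses : List Int) (speeds : List Int), Dom_solution progresses speeds → Pre_solution progresses speeds → Spec_solution progresses speeds (solution progresses speeds)

-- ===== LEMMAS AND PROOFS =====

-- reference grouping function both ports are reduced to
def pvGo : List Int → Int → Int → List Int
  | [], _, c => [c]
  | t :: ts, lead, c => if lead ≥ t then pvGo ts lead (c + 1) else c :: pvGo ts t 1

def pvGroups : List Int → List Int
  | [] => []
  | t :: ts => pvGo ts t 1

-- adjacent differences
def pvDiffs : List Int → List Int
  | a :: b :: l => (b - a) :: pvDiffs (b :: l)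
  | _ => []

-- record indices of ts above m, starting at index i
def pvRecs : List Int → Int → Int → List Int
  | [], _, _ => []
  | t :: ts, m, i => if t > m then i :: pvRecs ts t (i + 1) else pvRecs ts m (i + 1)

theorem pvDrainCount_eq (l : List Int) (acc : Int) : pvDrainCount l acc = acc + l.length := by
  induction l generalizing acc with
  | nil => simp [pvDrainCount]
  | cons a l ih => simp [pvDrainCount, ih]; ring

-- A's fold equals pvGo
theorem solA_go (ts : List Int) : ∀ (answer : List Int) (q0 : Int) (qrest : List Int),
    (let st := ts.foldl (fun (st : List Int × List Int) t =>
        match st.2 with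
        | [] => (st.1, st.2 ++ [t])
        | h :: _ =>
          if h ≥ t then (st.1, st.2 ++ [t])
          else (st.1 ++ [pvDrainCount st.2 0], [t])) (answer, q0 :: qrest)
     if st.2.isEmpty then st.1 else st.1 ++ [(st.2.length : Int)])
    = answer ++ pvGo ts q0 (qrest.length + 1) := by
  induction ts with
  | nil => intro answer q0 qrest; simp [pvGo]
  | cons t ts ih =>
    intro answer q0 qrest
    simp only [List.foldl_cons]
    by_cases h : q0 ≥ t
    · have : (q0 :: qrest) ++ [t] = q0 :: (qrest ++ [t]) := by simp
      simpa [pvGo, h, this, add_assoc, add_comm, add_left_comm] using ih answer q0 (qrest ++ [t])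
    · have h2 := ih (answer ++ [pvDrainCount (q0 :: qrest) 0]) t []
      simp only [pvGo, if_neg h]
      simp only [List.length_nil, Nat.cast_zero, zero_add] at h2
      rw [h2, List.append_assoc, List.singleton_append, pvDrainCount_eq,
          show (0 : Int) + ((q0 :: qrest).length : Int) = (qrest.length : Int) + 1 by
            simp only [List.length_cons]; push_cast; ring]

theorem solA_groups (progresses speeds : List Int) :
    solution progresses speeds
      = pvGroups ((List.zip progresses speeds).map (fun ps => pvCeil (100 - ps.1) ps.2)) := by
  unfold solution
  set times := (List.zip progresses speeds).map (fun ps => pvCeil (100 - ps.1) ps.2) with h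
  clear_value times
  cases times with
  | nil => simp [pvGroups]
  | cons t ts =>
    simp only [List.foldl_cons]
    simpa [pvGroups] using solA_go ts [] t []

-- B's fold: the accumulated starts list
theorem solB_fold (ts : List Int) : ∀ (starts : List Int) (m : Int) (i : Int),
    (ts.foldl (fun (st : List Int × Option Int × Int) t =>
        match st.2.1 with
        | none => (st.1 ++ [st.2.2], some t, st.2.2 + 1)
        | some m => if t > m then (st.1 ++ [st.2.2], some t, st.2.2 + 1)
                    else (st.1, some m, st.2.2 + 1)) (starts, some m, i)).1
    = starts ++ pvRecs ts m i := by
  induction ts with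
  | nil => intro starts m i; simp [pvRecs]
  | cons t ts ih =>
    intro starts m i
    simp only [List.foldl_cons, pvRecs]
    by_cases h : t > m
    · simpa [h] using ih (starts ++ [i]) t (i + 1)
    · simpa [h] using ih starts m (i + 1)

theorem zip_diffs (l : List Int) :
    (List.zip l (l.drop 1)).map (fun ab => ab.2 - ab.1) = pvDiffs l := by
  induction l with
  | nil => simp [pvDiffs]
  | cons a l ih =>
    cases l with
    | nil => simp [pvDiffs]
    | cons b l => simpa [pvDiffs] using ih

theorem diffs_recs (ts : List Int) : ∀ (m s i : Int),
    pvDiffs (s :: (pvRecs ts m i ++ [i + (ts.length : Int)])) = pvGo ts m (i - s) := by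
  induction ts with
  | nil => intro m s i; simp [pvRecs, pvDiffs, pvGo]
  | cons t ts ih =>
    intro m s i
    simp only [pvRecs, pvGo]
    by_cases h : t > m
    · have hml : ¬ (m ≥ t) := by omega
      have := ih t i (i + 1)
      simp only [if_pos h, if_neg hml, List.cons_append, pvDiffs]
      rw [show (i + 1) + (ts.length : Int) = i + ((ts.length : Int) + 1) by ring] at this
      simp only [List.length_cons]
      push_cast
      rw [show i + ((ts.length : Int) + 1) = i + (ts.length : Int) + 1 by ring] at this ⊢
      rw [this]
      simp
    · have hml : m ≥ t := by omega
      have := ih m s (i + 1)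
      simp only [if_neg h, if_pos hml, List.length_cons]
      rw [show (i + 1) + (ts.length : Int) = i + ((ts.length : Int) + 1) by ring,
          show (i + 1) - s = (i - s) + 1 by ring] at this
      push_cast
      exact this

theorem solB_groups (progresses speeds : List Int) :
    solution_alt progresses speeds
      = pvGroups ((List.zip progresses speeds).map (fun ps => pvCeil (100 - ps.1) ps.2)) := by
  unfold solution_alt
  set times := (List.zip progresses speeds).map (fun ps => pvCeil (100 - ps.1) ps.2) with h
  clear_value times
  cases times with
  | nil => simp [pvGroups]
  | cons t ts =>
    rw [zip_diffs]
    have hf : (List.foldl (fun (st : List Int × Option Int × Int) t =>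
        match st.2.1 with
        | none => (st.1 ++ [st.2.2], some t, st.2.2 + 1)
        | some m => if t > m then (st.1 ++ [st.2.2], some t, st.2.2 + 1)
                    else (st.1, some m, st.2.2 + 1)) ([], none, 0) (t :: ts)).1
        = (0 : Int) :: pvRecs ts t 1 := by
      simp only [List.foldl_cons]
      exact solB_fold ts [0] t 1
    rw [hf]
    have := diffs_recs ts t 0 1
    simp only [List.length_cons, pvGroups]
    rw [show ((0 : Int) :: pvRecs ts t 1) ++ [((ts.length + 1 : Nat) : Int)]
          = (0 : Int) :: (pvRecs ts t 1 ++ [1 + (ts.length : Int)]) by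
        simp only [List.cons_append, List.cons.injEq, List.append_cancel_left_eq,
          List.cons.injEq, and_true, true_and]
        push_cast; ring]
    simpa using this

-- ===== VERDICT (by name: the statement is the Claim_ definition above) =====
theorem solution_spec : Claim_equal_solution := by
  intro progresses speeds _ _
  unfold Spec_solution
  rw [solA_groups, solB_groups]
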